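-- pv_equiv track=rewrite | github.com/aavortep/bachelor_diploma | src/estimation.py | calc_measure
-- ===== SOURCE A (Python) =====
-- def calc_measure(downbeats: list) -> int:
--     downbeat_inds = [i for i, beat in enumerate(downbeats) if beat == 1]
--     if len(downbeat_inds) <= 1:
--         return 0
--     difs_sum = 0
--     for i in range(1, len(downbeat_inds)):
--         difs_sum += (downbeat_inds[i] - downbeat_inds[i - 1])
--     avg_measure = difs_sum / (len(downbeat_inds) - 1)
--     return round(avg_measure)
-- ===== SOURCE B (Python) =====
-- def calc_measure(downbeats: list) -> int:
--     count = 0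
--     first = 0
--     last = 0
--     for i, beat in enumerate(downbeats):
--         if beat == 1:
--             if count == 0:
--                 first = i
--             last = i
--             count += 1
--     if count <= 1:
--         return 0
--     return round((last - first) / (count - 1))
-- ===== Notes on version B (the rewrite author's own statement) =====
-- stated objective: simpler
-- what changed: B drops the index list and the second gap-summing loop: one pass tracks count/first/last of positions with beat==1 and uses the telescoping identity sum-of-gaps = last-first, so the result is round((last-first)/(count-1)).
import Mathlib
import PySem

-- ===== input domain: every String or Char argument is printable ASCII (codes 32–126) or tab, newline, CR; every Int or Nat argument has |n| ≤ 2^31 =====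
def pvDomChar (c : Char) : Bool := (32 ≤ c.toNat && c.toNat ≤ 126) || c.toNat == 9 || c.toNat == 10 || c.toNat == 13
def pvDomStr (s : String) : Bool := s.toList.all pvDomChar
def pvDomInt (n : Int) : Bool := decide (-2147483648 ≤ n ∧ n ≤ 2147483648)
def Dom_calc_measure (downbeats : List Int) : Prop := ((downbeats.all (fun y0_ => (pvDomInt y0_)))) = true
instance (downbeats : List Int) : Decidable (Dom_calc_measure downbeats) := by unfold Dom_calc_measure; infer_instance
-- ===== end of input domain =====

-- B changes: one pass with count/first/last instead of an index list plus a second gap-summing loop (simpler, O(1) extra space).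
-- Shared helper: Python's round(a/b) for b > 0 — round half to even of the exact
-- rational a/b.  Exact w.r.t. Python's float division here because both |a| and b
-- are bounded by the list length (indices), far below 2^52, so a/b is either an
-- exact dyadic half or more than half an ulp away from one.
def pyRoundDiv (a b : Int) : Int :=
  let q := PySem.Int.floordiv a b
  let r := PySem.Int.mod a b
  if 2 * r < b then q
  else if b < 2 * r then q + 1
  else if q % 2 = 0 then q else q + 1

-- ===== PORT A =====
def calc_measure (downbeats : List Int) : Int :=
  let inds : List Int :=
    (PySem.List.enumerate downbeats 0).filterMap
      (fun p => if p.2 = 1 then some p.1 else none)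
  if inds.length ≤ 1 then 0
  else
    let difs_sum :=
      (PySem.List.pyRange 1 (inds.length : Int) 1).foldl
        (fun s i => s + (PySem.List.pyGetD inds i 0 - PySem.List.pyGetD inds (i - 1) 0)) 0
    pyRoundDiv difs_sum ((inds.length : Int) - 1)

-- ===== PORT B =====
def calc_measure_alt (downbeats : List Int) : Int :=
  let st :=
    (PySem.List.enumerate downbeats 0).foldl
      (fun (st : Int × Int × Int) p =>
        if p.2 = 1 then
          (st.1 + 1, (if st.1 = 0 then p.1 else st.2.1), p.1)
        else st) (0, 0, 0)
  if st.1 ≤ 1 then 0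
  else pyRoundDiv (st.2.2 - st.2.1) (st.1 - 1)

-- ===== PRECONDITION & SPEC =====
def Spec_calc_measure (downbeats : List Int) (out : Int) : Prop := out = calc_measure_alt downbeats
instance (downbeats : List Int) (out : Int) : Decidable (Spec_calc_measure downbeats out) := by unfold Spec_calc_measure; infer_instance

-- ===== CLAIM (what is proved, stated in full; the proofs are below) =====
def Claim_equal_calc_measure : Prop := ∀ (downbeats : List Int), Dom_calc_measure downbeats → Spec_calc_measure downbeats (calc_measure downbeats)

-- ===== LEMMAS AND PROOFS =====

-- B's fold over enumerate equals a fold over the filtered index list (A's `inds`).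
theorem foldl_filterMap_if {α β γ : Type} (P : α → Prop) [DecidablePred P]
    (g : α → β) (f : γ → β → γ) (l : List α) (st : γ) :
    l.foldl (fun st p => if P p then f st (g p) else st) st
      = (l.filterMap (fun p => if P p then some (g p) else none)).foldl f st := by
  induction l generalizing st with
  | nil => rfl
  | cons x xs ih =>
      by_cases h : P x <;> simp [h, ih]

-- the inner step of B, on the index list
def stepB (st : Int × Int × Int) (i : Int) : Int × Int × Int :=
  (st.1 + 1, (if st.1 = 0 then i else st.2.1), i)

theorem foldl_stepB_pos (ys : List Int) (c f l : Int) (hc : 1 ≤ c) :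
    ys.foldl stepB (c, f, l) = (c + ys.length, f, ys.getLastD l) := by
  induction ys generalizing c l with
  | nil => simp
  | cons y t ih =>
      have hc0 : c ≠ 0 := by omega
      have := ih (c + 1) y (by omega)
      rw [List.foldl_cons]
      have hs : stepB (c, f, l) y = (c + 1, f, y) := by simp [stepB, hc0]
      rw [hs, this, List.getLastD_cons]
      simp only [List.length_cons]
      congr 1
      push_cast
      ring

theorem foldl_stepB_cons (y : Int) (t : List Int) :
    (y :: t).foldl stepB (0, 0, 0) = (1 + (t.length : Int), y, t.getLastD y) := by
  have h := foldl_stepB_pos t 1 y y le_rfl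
  simpa [stepB] using h

-- telescoping: A's gap-summing loop computes last - head
theorem gapsum_eq (xs : List Int) (hxs : xs ≠ []) :
    (PySem.List.pyRange 1 (xs.length : Int) 1).foldl
        (fun s i => s + (PySem.List.pyGetD xs i 0 - PySem.List.pyGetD xs (i - 1) 0)) 0
      = xs.getLastD 0 - xs.headD 0 := by
  induction xs using List.reverseRecOn with
  | nil => exact absurd rfl hxs
  | append_singleton xs y ih =>
      rcases eq_or_ne xs [] with rfl | hne
      · simp [PySem.List.pyRange_one_eq_nil]
      · have hn : 1 ≤ xs.length := List.length_pos_of_ne_nil hne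
        have hcast : ((xs ++ [y]).length : Int) = (xs.length : Int) + 1 := by
          simp
        rw [hcast, PySem.List.pyRange_one_succ_right (by exact_mod_cast hn),
          List.foldl_append]
        have hpre :
            (PySem.List.pyRange 1 (xs.length : Int) 1).foldl
              (fun s i => s + (PySem.List.pyGetD (xs ++ [y]) i 0 - PySem.List.pyGetD (xs ++ [y]) (i - 1) 0)) 0
            = (PySem.List.pyRange 1 (xs.length : Int) 1).foldl
              (fun s i => s + (PySem.List.pyGetD xs i 0 - PySem.List.pyGetD xs (i - 1) 0)) 0 := by
          refine PySem.List.foldl_congr_mem _ _ _ _ ?_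
          intro acc i hi
          rw [PySem.List.mem_pyRange_one] at hi
          obtain ⟨k, rfl⟩ : ∃ k : Nat, i = (k : Int) := ⟨i.toNat, by omega⟩
          have hk1 : 1 ≤ k := by omega
          have hk2 : k < xs.length := by omega
          have hsub : ((k : Int) - 1) = ((k - 1 : Nat) : Int) := by omega
          rw [hsub, PySem.List.pyGetD_natCast, PySem.List.pyGetD_natCast,
            PySem.List.pyGetD_natCast, PySem.List.pyGetD_natCast,
            List.getD_eq_getElem?_getD, List.getD_eq_getElem?_getD,
            List.getD_eq_getElem?_getD, List.getD_eq_getElem?_getD,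
            List.getElem?_append_left hk2, List.getElem?_append_left (by omega)]
        rw [hpre, ih hne]
        have hlast : PySem.List.pyGetD (xs ++ [y]) (xs.length : Int) 0 = y := by
          rw [PySem.List.pyGetD_natCast]
          simp [List.getD_eq_getElem?_getD]
        have hprev : PySem.List.pyGetD (xs ++ [y]) ((xs.length : Int) - 1) 0 = xs.getLastD 0 := by
          have h : ((xs.length : Int) - 1) = ((xs.length - 1 : Nat) : Int) := by omega
          rw [h, PySem.List.pyGetD_natCast,
            List.getD_eq_getElem?_getD, List.getElem?_append_left (by omega),
            List.getLastD_eq_getLast?, List.getLast?_eq_getElem?]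
        simp only [List.foldl_cons, List.foldl_nil]
        rw [hlast, hprev]
        have hhead : (xs ++ [y]).headD 0 = xs.headD 0 := by
          rcases xs with _ | ⟨a, t⟩
          · exact absurd rfl hne
          · rfl
        have hlast2 : (xs ++ [y]).getLastD 0 = y := by simp
        rw [hhead, hlast2]
        ring

-- ===== VERDICT (by name: the statement is the Claim_ definition above) =====
theorem calc_measure_spec : Claim_equal_calc_measure := by
  intro downbeats _
  unfold Spec_calc_measure calc_measure calc_measure_alt
  have hB := foldl_filterMap_if (fun p : Int × Int => p.2 = 1) (fun p => p.1) stepB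
      (PySem.List.enumerate downbeats 0) (0, 0, 0)
  simp only [stepB] at hB
  rw [hB]
  set ys := (PySem.List.enumerate downbeats 0).filterMap
      (fun p => if p.2 = 1 then some p.1 else none) with hys
  rcases ys with _ | ⟨x, t⟩
  · simp
  · rcases t with _ | ⟨z, u⟩
    · rw [foldl_stepB_cons]
      simp
    · rw [foldl_stepB_cons]
      have hne : (x :: z :: u) ≠ ([] : List Int) := by simp
      have hlen : ¬ ((x :: z :: u).length ≤ 1) := by simp
      have hcnt : ¬ ((1 : Int) + ((z :: u).length : Int) ≤ 1) := by
        simp only [List.length_cons]; push_cast; omega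
      simp only [hlen, if_false, hcnt]
      rw [gapsum_eq _ hne]
      have h1 : (x :: z :: u).getLastD 0 = (z :: u).getLastD x := by rw [List.getLastD_cons]
      have h2 : (x :: z :: u).headD 0 = x := rfl
      rw [h1, h2]
      congr 1
      simp only [List.length_cons]; push_cast; ring
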